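-- pv_equiv track=rewrite | github.com/pypi-data/pypi-mirror-313 | packages/maquinas/maquinas-0.3.2.0.tar.gz/maquinas-0.3.2.0/maquinas/languages.py | string_right_cancellation
-- ===== SOURCE A (Python) =====
-- def string_right_cancellation(w, b):
--     if len(w) == 0:
--         return ""
--     else:
--         a = w[-1]
--         w_ = w[:-1]
--         if a == b:
--             return w_
--         else:
--             return string_right_cancellation(w_, b)
-- ===== SOURCE B (Python) =====
-- def string_right_cancellation(w, b):
--     for i in range(len(w) - 1, -1, -1):
--         if w[i] == b:
--             return w[:i]
--     return ""
-- ===== Notes on version B (the rewrite author's own statement) =====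
-- stated objective: faster
-- what changed: Replaces A's recursion (which rebuilds a shortened copy w[:-1] of the string at every step before recursing) with a single iterative right-to-left index scan that returns w[:i] at the first match.
import Mathlib
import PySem

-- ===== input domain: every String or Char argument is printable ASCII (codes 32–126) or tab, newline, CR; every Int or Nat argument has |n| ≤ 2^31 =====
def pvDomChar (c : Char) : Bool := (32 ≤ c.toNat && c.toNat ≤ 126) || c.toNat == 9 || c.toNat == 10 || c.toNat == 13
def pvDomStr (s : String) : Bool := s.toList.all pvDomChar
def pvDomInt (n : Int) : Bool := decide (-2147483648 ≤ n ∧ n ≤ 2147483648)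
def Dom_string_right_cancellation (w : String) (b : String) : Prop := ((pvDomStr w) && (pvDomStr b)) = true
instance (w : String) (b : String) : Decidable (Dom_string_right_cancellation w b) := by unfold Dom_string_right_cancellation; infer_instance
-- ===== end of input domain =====

-- B replaces A's tail recursion on w[:-1] with one iterative right-to-left index scan (simpler, one pass).


-- ===== PORT A =====
-- A's recursion over List Char: a = w[-1] (pyGetD at -1), w_ = w[:-1] (slice to -1);
-- the 1-char string a compared to b is [a] = bl.
def srcGoA (l : List Char) (bl : List Char) : List Char :=
  if _h : l.length = 0 then []
  else
    let a := PySem.List.pyGetD l (-1) ' '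
    let w_ := PySem.List.slice l none (some (-1))
    if [a] = bl then w_ else srcGoA w_ bl
termination_by l.length
decreasing_by
  simp only [PySem.List.slice_to_neg_one, List.length_dropLast]
  omega

def string_right_cancellation (w : String) (b : String) : String :=
  String.mk (srcGoA w.toList b.toList)

-- ===== PORT B =====
-- B's loop `for i in range(len(w)-1, -1, -1)` as downward recursion on the index;
-- the argument i+1 means the loop is currently at index i.
def altLoopB (wl : List Char) (bl : List Char) : Nat → List Char
  | 0 => []
  | i + 1 => if [wl.getD i ' '] = bl then wl.take i else altLoopB wl bl i

def string_right_cancellation_alt (w : String) (b : String) : String :=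
  String.mk (altLoopB w.toList b.toList w.toList.length)

-- ===== PRECONDITION & SPEC =====
def Spec_string_right_cancellation (w : String) (b : String) (out : String) : Prop := out = string_right_cancellation_alt w b
instance (w : String) (b : String) (out : String) : Decidable (Spec_string_right_cancellation w b out) := by unfold Spec_string_right_cancellation; infer_instance

-- ===== CLAIM (what is proved, stated in full; the proofs are below) =====
def Claim_equal_string_right_cancellation : Prop := ∀ (w : String) (b : String), Dom_string_right_cancellation w b → Spec_string_right_cancellation w b (string_right_cancellation w b)

-- ===== LEMMAS AND PROOFS =====

-- indices below xs.length never look past xs, so a suffix does not matter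
theorem altLoopB_append (xs ys bl : List Char) (i : Nat) (h : i ≤ xs.length) :
    altLoopB (xs ++ ys) bl i = altLoopB xs bl i := by
  induction i with
  | zero => rfl
  | succ k ih =>
      have hk : k < xs.length := by omega
      simp only [altLoopB]
      rw [List.getD_append _ _ _ _ hk, List.take_append_of_le_length (by omega), ih (by omega)]

theorem srcGoA_eq_altLoopB (l bl : List Char) : srcGoA l bl = altLoopB l bl l.length := by
  induction l using List.reverseRecOn with
  | nil => simp [srcGoA, altLoopB]
  | append_singleton xs x ih =>
      rw [srcGoA]
      simp only [List.length_append, List.length_singleton, PySem.List.pyGetD_neg_one_append_singleton,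
        PySem.List.slice_to_neg_one, List.dropLast_concat]
      have hlen : xs.length + 1 ≠ 0 := by omega
      rw [dif_neg hlen]
      show (if [x] = bl then xs else srcGoA xs bl) = altLoopB (xs ++ [x]) bl (xs.length + 1)
      simp only [altLoopB, List.getD_append_right _ _ _ _ (le_refl _), Nat.sub_self,
        List.getD_cons_zero, List.take_left]
      by_cases hb : [x] = bl
      · simp [hb]
      · rw [if_neg hb, if_neg hb, ih, altLoopB_append xs [x] bl xs.length (le_refl _)]

-- ===== VERDICT (by name: the statement is the Claim_ definition above) =====
theorem string_right_cancellation_spec : Claim_equal_string_right_cancellation := by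
  intro w b _
  unfold Spec_string_right_cancellation string_right_cancellation string_right_cancellation_alt
  rw [srcGoA_eq_altLoopB]
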